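-- pv_equiv track=rewrite | github.com/bpupadhyaya/programming-interviews | top/topgoogbyfrequency/python/group3/maximum_score_of_a_node_sequence_G28.py | maximum_score1
-- ===== SOURCE A (Python) =====
-- from collections import defaultdict
-- from heapq import nlargest, heappush, heappop
--
-- def maximum_score1(scores: list[int], edges: list[list[int]]) -> int:
--     g = defaultdict(list)
--     for a, b in edges:
--         heappush(g[a], (scores[b], b))
--         if len(g[a]) > 3:
--             heappop(g[a])
--         heappush(g[b], (scores[a], a))
--         if len(g[b]) > 3:
--             heappop(g[b])
--
--     ans = -1
--     for a, b in edges: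
--         for s1, n1 in g[a]:
--             if n1 == b:
--                 continue
--             for s2, n2 in g[b]:
--                 if n2 == n1 or n2 == a:
--                     continue
--                 ans = max(ans, scores[a] + scores[b] + s1 + s2)
--     return ans
-- ===== SOURCE B (Python) =====
-- def maximum_score1(scores: list[int], edges: list[list[int]]) -> int:
--     # Stage 1: flatten edges into a stream of (node, (neighbour score, neighbour)) contributions.
--     pairs = []
--     for a, b in edges:
--         pairs.append((a, (scores[b], b)))
--         pairs.append((b, (scores[a], a)))
--     # Stage 2: group the stream into full adjacency lists.
--     g = {}
--     for node, item in pairs: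
--         g.setdefault(node, []).append(item)
--     # Stage 3: build the flat list of all candidate path sums (top-3 neighbours per
--     # endpoint via sort-and-slice, same skip conditions as the problem demands).
--     cands = [scores[a] + scores[b] + s1 + s2
--              for a, b in edges
--              for s1, n1 in sorted(g[a])[-3:] if n1 != b
--              for s2, n2 in sorted(g[b])[-3:] if n2 != n1 and n2 != a]
--     # Stage 4: reduce.
--     ans = -1
--     for c in cands:
--         ans = max(ans, c)
--     return ans
-- ===== Notes on version B (the rewrite author's own statement) =====
-- stated objective: alternative
-- what changed: A interleaves bounded min-heap maintenance (heappush + conditional heappop keeping at most 3 neighbours) into the edge loop and accumulates the maximum inside a triply nested loop; B is staged: it flattens edges into a (node, neighbour) stream, groups the stream into full adjacency lists, materialises the flat list of all candidate sums with sort-and-slice top-3 selection inside a comprehension, and reduces that list with max at the end.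
import Mathlib
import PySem

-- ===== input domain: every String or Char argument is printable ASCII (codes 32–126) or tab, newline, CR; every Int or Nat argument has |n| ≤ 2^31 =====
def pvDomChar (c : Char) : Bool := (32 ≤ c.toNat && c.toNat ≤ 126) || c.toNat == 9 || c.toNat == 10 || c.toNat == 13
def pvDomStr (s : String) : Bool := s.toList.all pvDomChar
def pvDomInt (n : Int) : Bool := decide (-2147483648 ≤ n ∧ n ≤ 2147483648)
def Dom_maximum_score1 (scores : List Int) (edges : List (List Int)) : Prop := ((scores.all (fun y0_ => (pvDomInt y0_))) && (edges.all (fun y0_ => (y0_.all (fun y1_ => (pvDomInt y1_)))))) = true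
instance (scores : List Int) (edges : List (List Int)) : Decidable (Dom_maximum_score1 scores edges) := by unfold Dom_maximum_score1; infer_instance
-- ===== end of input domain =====

-- B replaces A's single edge loop with interleaved bounded-heap maintenance and nested
-- max-accumulation by four separate stages: flatten edges to a contribution stream, group it
-- into full adjacency lists, materialise the flat candidate list (sort-and-slice top-3
-- selection inside a comprehension), and reduce it by max (objective: alternative).

-- ===== PORT A =====
-- Python tuple (s, n) ≤ comparison, lexicographic.
def pleb (p q : Int × Int) : Bool := decide (p.1 < q.1) || (decide (p.1 = q.1) && decide (p.2 ≤ q.2))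

-- The ≤3-element heap is modelled as an ascending sorted list: heappush = sorted insert,
-- heappop = remove the head (the minimum).  This is exact w.r.t. the MULTISET kept in the heap,
-- which is all A's result depends on (the second loop only takes a max over the heap's elements).
def pins (x : Int × Int) : List (Int × Int) → List (Int × Int)
  | [] => [x]
  | y :: ys => if pleb x y then x :: y :: ys else y :: pins x ys

-- heappush, then heappop if the length exceeded 3
def hpushB (l : List (Int × Int)) (x : Int × Int) : List (Int × Int) :=
  let l' := pins x l
  if 3 < l'.length then l'.tail else l'

def maximum_score1 (scores : List Int) (edges : List (List Int)) : Int :=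
  let g := edges.foldl (fun g e =>
      let a := PySem.List.pyGetD e 0 0
      let b := PySem.List.pyGetD e 1 0
      let g := g.insert a (hpushB (g.getD a []) (PySem.List.pyGetD scores b 0, b))
      g.insert b (hpushB (g.getD b []) (PySem.List.pyGetD scores a 0, a)))
    PySem.Dict.empty
  edges.foldl (fun ans e =>
      let a := PySem.List.pyGetD e 0 0
      let b := PySem.List.pyGetD e 1 0
      (g.getD a []).foldl (fun ans p =>
        if p.2 = b then ans else
        (g.getD b []).foldl (fun ans q =>
          if q.2 = p.2 ∨ q.2 = a then ans else
          max ans (PySem.List.pyGetD scores a 0 + PySem.List.pyGetD scores b 0 + p.1 + q.1)) ans) ans)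
    (-1)

-- ===== PORT B =====
-- sorted(v)[-3:] : Python's tuple sort is sorted2 with the two component keys
def top3 (v : List (Int × Int)) : List (Int × Int) :=
  PySem.List.slice (PySem.List.sorted2 v Prod.fst Prod.snd) (some (-3)) none

def maximum_score1_alt (scores : List Int) (edges : List (List Int)) : Int :=
  -- Stage 1: the flattened contribution stream
  let pairs := edges.flatMap (fun e =>
    let a := PySem.List.pyGetD e 0 0
    let b := PySem.List.pyGetD e 1 0
    [(a, (PySem.List.pyGetD scores b 0, b)), (b, (PySem.List.pyGetD scores a 0, a))])
  -- Stage 2: group the stream into full adjacency lists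
  let g := pairs.foldl (fun g p => g.insert p.1 (g.getD p.1 [] ++ [p.2])) PySem.Dict.empty
  -- Stage 3: the flat list of all candidate sums (comprehension = flatMap/filter/map)
  let cands := edges.flatMap (fun e =>
    let a := PySem.List.pyGetD e 0 0
    let b := PySem.List.pyGetD e 1 0
    ((top3 (g.getD a [])).filter (fun p => p.2 != b)).flatMap (fun p =>
      ((top3 (g.getD b [])).filter (fun q => q.2 != p.2 && q.2 != a)).map (fun q =>
        PySem.List.pyGetD scores a 0 + PySem.List.pyGetD scores b 0 + p.1 + q.1)))
  -- Stage 4: reduce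
  cands.foldl max (-1)

-- ===== PRECONDITION & SPEC =====
-- Exactly where Python A returns: every edge unpacks as [a, b] (else ValueError) and both
-- endpoints are valid (possibly negative) indices into scores (else IndexError).
def Pre_maximum_score1 (scores : List Int) (edges : List (List Int)) : Prop :=
  ∀ e ∈ edges, e.length = 2 ∧ ∀ i ∈ e, PySem.Raise.InRange scores.length i
instance (scores : List Int) (edges : List (List Int)) : Decidable (Pre_maximum_score1 scores edges) := by unfold Pre_maximum_score1; infer_instance

def pvWitness_maximum_score1 : List Int × List (List Int) :=
  ([5, 2, 9, 8, 4], [[0, 1], [1, 2], [2, 3], [0, 2], [1, 3], [2, 4]])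

def Spec_maximum_score1 (scores : List Int) (edges : List (List Int)) (out : Int) : Prop := out = maximum_score1_alt scores edges
instance (scores : List Int) (edges : List (List Int)) (out : Int) : Decidable (Spec_maximum_score1 scores edges out) := by unfold Spec_maximum_score1; infer_instance

-- ===== CLAIM (what is proved, stated in full; the proofs are below) =====
def Claim_equal_maximum_score1 : Prop := ∀ (scores : List Int) (edges : List (List Int)), Dom_maximum_score1 scores edges → Pre_maximum_score1 scores edges → Spec_maximum_score1 scores edges (maximum_score1 scores edges)

-- ===== LEMMAS AND PROOFS =====

-- the comparator sorted2 uses with the two projection keys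
def myb (p q : Int × Int) : Bool := decide (p.1 < q.1) || (!decide (q.1 < p.1) && decide (p.2 < q.2))

theorem pleb_total {p q : Int × Int} (h : ¬ pleb p q = true) : pleb q p = true := by
  simp [pleb] at *; omega

theorem pleb_trans {p q r : Int × Int} (h1 : pleb p q = true) (h2 : pleb q r = true) :
    pleb p r = true := by
  simp [pleb] at *; omega

theorem pleb_of_myb {p q : Int × Int} (h : myb p q = true) : pleb p q = true := by
  simp [pleb, myb] at *; omega

theorem eq_of_myb_false_pleb {p q : Int × Int} (h : myb p q = false) (h2 : pleb p q = true) :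
    p = q := by
  simp [pleb, myb] at *
  have : p.1 = q.1 ∧ p.2 = q.2 := by omega
  exact Prod.ext this.1 this.2

theorem length_pins (x : Int × Int) (l : List (Int × Int)) :
    (pins x l).length = l.length + 1 := by
  induction l with
  | nil => rfl
  | cons y ys ih => simp only [pins]; split <;> simp [ih]

theorem pins_all_le (x : Int × Int) (l : List (Int × Int)) (h : ∀ z ∈ l, pleb x z = true) :
    pins x l = x :: l := by
  cases l with
  | nil => rfl
  | cons y ys => simp only [pins, h y (by simp), if_true]

theorem pins_perm (x : Int × Int) (l : List (Int × Int)) : (pins x l).Perm (x :: l) := by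
  induction l with
  | nil => rfl
  | cons y ys ih =>
    simp only [pins]
    split
    · rfl
    · exact (ih.cons y).trans (List.Perm.swap x y ys)

theorem mem_pins {x z : Int × Int} {l : List (Int × Int)} (h : z ∈ pins x l) :
    z = x ∨ z ∈ l := by
  have := (pins_perm x l).mem_iff.1 h
  simpa using this

theorem pins_pairwise (x : Int × Int) (l : List (Int × Int))
    (h : l.Pairwise (fun a b => pleb a b = true)) :
    (pins x l).Pairwise (fun a b => pleb a b = true) := by
  induction l with
  | nil => simp [pins]
  | cons y ys ih =>
    rcases List.pairwise_cons.1 h with ⟨hy, hys⟩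
    simp only [pins]
    split
    · rename_i hxy
      refine List.pairwise_cons.2 ⟨?_, h⟩
      intro z hz
      rcases List.mem_cons.1 hz with h | h
      · exact h ▸ hxy
      · exact pleb_trans hxy (hy z h)
    · rename_i hxy
      refine List.pairwise_cons.2 ⟨?_, ih hys⟩
      intro z hz
      rcases mem_pins hz with h | h
      · exact h ▸ pleb_total hxy
      · exact hy z h

theorem pins_drop (x : Int × Int) (l : List (Int × Int))
    (h : l.Pairwise (fun a b => pleb a b = true)) (k : Nat) :
    (pins x l).drop (k + 1) = (pins x (l.drop k)).tail := by
  induction l generalizing k with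
  | nil => simp [pins]
  | cons y ys ih =>
    cases k with
    | zero => simp [List.drop_one]
    | succ k =>
      rcases List.pairwise_cons.1 h with ⟨hy, hys⟩
      simp only [pins, List.drop_succ_cons]
      split
      · rename_i hxy
        rw [List.drop_succ_cons, List.drop_succ_cons]
        rw [pins_all_le x (ys.drop k) (fun z hz => pleb_trans hxy (hy z (List.mem_of_mem_drop hz)))]
        rfl
      · rw [List.drop_succ_cons]
        exact ih hys k

theorem insertBy_ge (x : Int × Int) (l : List (Int × Int))
    (hall : ∀ z ∈ l, pleb x z = true)
    (h : l.Pairwise (fun a b => pleb a b = true)) :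
    PySem.List.insertBy myb x l = x :: l := by
  induction l with
  | nil => rfl
  | cons y ys ih =>
    rcases List.pairwise_cons.1 h with ⟨hy, hys⟩
    simp only [PySem.List.insertBy]
    split
    · rfl
    · rename_i hxy
      have hxeq : x = y := eq_of_myb_false_pleb (by simpa using hxy) (hall y (by simp))
      rw [ih (fun z hz => hall z (by simp [hz])) hys, hxeq]

theorem insertBy_eq_pins (x : Int × Int) (l : List (Int × Int))
    (h : l.Pairwise (fun a b => pleb a b = true)) :
    PySem.List.insertBy myb x l = pins x l := by
  induction l with
  | nil => rfl
  | cons y ys ih =>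
    rcases List.pairwise_cons.1 h with ⟨hy, hys⟩
    simp only [PySem.List.insertBy, pins]
    by_cases hm : myb x y = true
    · simp [hm, pleb_of_myb hm]
    · simp only [hm, Bool.false_eq_true, if_false]
      by_cases hp : pleb x y = true
      · have hxeq : x = y := eq_of_myb_false_pleb (by simpa using hm) hp
        rw [insertBy_ge x ys (fun z hz => hxeq ▸ hy z hz) hys]
        subst hxeq
        simp [show pleb x x = true from by simp [pleb]]
      · simp [hp, ih hys]

-- sorted2 with the two projection keys is the left fold of insertBy myb
theorem sorted2_eq_foldl (v : List (Int × Int)) :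
    PySem.List.sorted2 v Prod.fst Prod.snd false
      = v.foldl (fun acc x => PySem.List.insertBy myb x acc) [] := rfl

theorem sorted2_foldl_pairwise (v : List (Int × Int)) (acc : List (Int × Int))
    (h : acc.Pairwise (fun a b => pleb a b = true)) :
    (v.foldl (fun acc x => PySem.List.insertBy myb x acc) acc).Pairwise
      (fun a b => pleb a b = true) := by
  induction v generalizing acc with
  | nil => simpa
  | cons x xs ih =>
    simp only [List.foldl_cons]
    exact ih _ (by rw [insertBy_eq_pins x acc h]; exact pins_pairwise x acc h)

theorem sorted2_pairwise' (v : List (Int × Int)) :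
    (PySem.List.sorted2 v Prod.fst Prod.snd false).Pairwise (fun a b => pleb a b = true) := by
  rw [sorted2_eq_foldl]; exact sorted2_foldl_pairwise v [] (by simp)

theorem sorted2_snoc (v : List (Int × Int)) (x : Int × Int) :
    PySem.List.sorted2 (v ++ [x]) Prod.fst Prod.snd false
      = pins x (PySem.List.sorted2 v Prod.fst Prod.snd false) := by
  rw [sorted2_eq_foldl, List.foldl_append, List.foldl_cons, List.foldl_nil,
    ← sorted2_eq_foldl, insertBy_eq_pins x _ (sorted2_pairwise' v)]

theorem length_sorted2' (v : List (Int × Int)) :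
    (PySem.List.sorted2 v Prod.fst Prod.snd false).length = v.length :=
  (PySem.List.sorted2_perm v Prod.fst Prod.snd false).length_eq

theorem top3_eq_drop (v : List (Int × Int)) :
    top3 v = (PySem.List.sorted2 v Prod.fst Prod.snd false).drop (v.length - 3) := by
  rw [top3, PySem.List.slice_from_neg_ofNat _ 3 (by omega), length_sorted2']

-- the heart: the bounded heap step equals append-then-top3
theorem hpushB_top3 (v : List (Int × Int)) (x : Int × Int) :
    hpushB (top3 v) x = top3 (v ++ [x]) := by
  have hS := sorted2_pairwise' v
  rw [top3_eq_drop, top3_eq_drop, List.length_append, List.length_singleton, sorted2_snoc]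
  set S := PySem.List.sorted2 v Prod.fst Prod.snd false with hSdef
  have hlen : S.length = v.length := length_sorted2' v
  by_cases hn : v.length ≤ 2
  · have h0 : v.length - 3 = 0 := by omega
    have h1 : v.length + 1 - 3 = 0 := by omega
    rw [h0, h1, List.drop_zero, List.drop_zero, hpushB]
    simp only [length_pins]
    rw [if_neg (by omega)]
  · have h3 : (S.drop (v.length - 3)).length = 3 := by
      rw [List.length_drop, hlen]; omega
    rw [hpushB]
    simp only [length_pins, h3]
    rw [if_pos (by omega)]
    have := pins_drop x S hS (v.length - 3)
    have harith : v.length - 3 + 1 = v.length + 1 - 3 := by omega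
    rw [harith] at this
    exact this.symm

-- folding over a flatMap = nested folding (loop shape of B's stages 1/2 and 3/4)
theorem foldl_flatMap' {α β γ : Type} (f : α → List β) (g : γ → β → γ) (l : List α) (i : γ) :
    (l.flatMap f).foldl g i = l.foldl (fun acc x => (f x).foldl g acc) i := by
  induction l generalizing i with
  | nil => rfl
  | cons x xs ih => simp [List.flatMap_cons, List.foldl_append, ih]

-- B's grouping fold over the flattened stream equals A-shaped per-edge double insert
theorem group_eq_double_insert (scores : List Int) (edges : List (List Int)) :
    (edges.flatMap (fun e =>
        let a := PySem.List.pyGetD e 0 0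
        let b := PySem.List.pyGetD e 1 0
        [(a, (PySem.List.pyGetD scores b 0, b)), (b, (PySem.List.pyGetD scores a 0, a))])).foldl
      (fun g p => g.insert p.1 (g.getD p.1 [] ++ [p.2])) PySem.Dict.empty
    = edges.foldl (fun g e =>
        let a := PySem.List.pyGetD e 0 0
        let b := PySem.List.pyGetD e 1 0
        let g := g.insert a (g.getD a [] ++ [(PySem.List.pyGetD scores b 0, b)])
        g.insert b (g.getD b [] ++ [(PySem.List.pyGetD scores a 0, a)])) PySem.Dict.empty := by
  rw [foldl_flatMap']
  rfl

-- Dict invariant through the build fold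
theorem build_inv (scores : List Int) (edges : List (List Int)) :
    ∀ (gA gB : PySem.Dict Int (List (Int × Int))),
    (∀ k, gA.getD k [] = top3 (gB.getD k [])) →
    ∀ k,
      (edges.foldl (fun g e =>
        let a := PySem.List.pyGetD e 0 0
        let b := PySem.List.pyGetD e 1 0
        let g := g.insert a (hpushB (g.getD a []) (PySem.List.pyGetD scores b 0, b))
        g.insert b (hpushB (g.getD b []) (PySem.List.pyGetD scores a 0, a))) gA).getD k []
      = top3 ((edges.foldl (fun g e =>
        let a := PySem.List.pyGetD e 0 0
        let b := PySem.List.pyGetD e 1 0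
        let g := g.insert a (g.getD a [] ++ [(PySem.List.pyGetD scores b 0, b)])
        g.insert b (g.getD b [] ++ [(PySem.List.pyGetD scores a 0, a)])) gB).getD k []) := by
  induction edges with
  | nil => intro gA gB h k; simpa using h k
  | cons e es ih =>
    intro gA gB h k
    simp only [List.foldl_cons]
    apply ih
    intro k'
    set a := PySem.List.pyGetD e 0 0
    set b := PySem.List.pyGetD e 1 0
    simp only [PySem.Dict.getD_insert]
    by_cases hb : k' = b
    · rw [if_pos hb, if_pos hb]
      by_cases ha : b = a
      · rw [if_pos ha, if_pos ha, h a, hpushB_top3, hpushB_top3]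
      · rw [if_neg ha, if_neg ha, h b, hpushB_top3]
    · rw [if_neg hb, if_neg hb]
      by_cases ha : k' = a
      · rw [if_pos ha, if_pos ha, h a, hpushB_top3]
      · rw [if_neg ha, if_neg ha]; exact h k'

theorem top3_nil : top3 [] = [] := rfl

-- A's innermost skip-loop equals max-fold over B's filtered mapped candidate row
theorem inner_eq (sa sb s1 : Int) (a n1 : Int) (Lb : List (Int × Int)) (ans : Int) :
    Lb.foldl (fun ans q =>
        if q.2 = n1 ∨ q.2 = a then ans else max ans (sa + sb + s1 + q.1)) ans
    = ((Lb.filter (fun q => q.2 != n1 && q.2 != a)).map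
        (fun q => sa + sb + s1 + q.1)).foldl max ans := by
  induction Lb generalizing ans with
  | nil => rfl
  | cons q qs ih =>
    simp only [List.foldl_cons, List.filter_cons]
    by_cases h : q.2 = n1 ∨ q.2 = a
    · have hc : (q.2 != n1 && q.2 != a) = false := by rcases h with h | h <;> simp [h]
      rw [if_pos h]
      simp only [hc, Bool.false_eq_true, if_false]
      exact ih ans
    · have hc : (q.2 != n1 && q.2 != a) = true := by
        rcases not_or.1 h with ⟨h1, h2⟩; simp [h1, h2]
      rw [if_neg h]
      simp only [hc, if_true, List.map_cons, List.foldl_cons]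
      exact ih _

-- A's middle skip-loop equals max-fold over B's per-edge candidate block
theorem middle_eq (sa sb : Int) (a b : Int) (La Lb : List (Int × Int)) (ans : Int) :
    La.foldl (fun ans p =>
        if p.2 = b then ans else
        Lb.foldl (fun ans q =>
          if q.2 = p.2 ∨ q.2 = a then ans else max ans (sa + sb + p.1 + q.1)) ans) ans
    = ((La.filter (fun p => p.2 != b)).flatMap (fun p =>
        (Lb.filter (fun q => q.2 != p.2 && q.2 != a)).map
          (fun q => sa + sb + p.1 + q.1))).foldl max ans := by
  induction La generalizing ans with
  | nil => rfl
  | cons p ps ih =>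
    simp only [List.foldl_cons, List.filter_cons]
    by_cases h : p.2 = b
    · have hc : (p.2 != b) = false := by simp [h]
      rw [if_pos h]
      simp only [hc, Bool.false_eq_true, if_false]
      exact ih ans
    · have hc : (p.2 != b) = true := by simp [h]
      rw [if_neg h]
      simp only [hc, if_true, List.flatMap_cons, List.foldl_append]
      rw [inner_eq]
      exact ih _

-- ===== VERDICT (by name: the statement is the Claim_ definition above) =====
theorem maximum_score1_spec : Claim_equal_maximum_score1 := by
  intro scores edges _ _
  unfold Spec_maximum_score1 maximum_score1 maximum_score1_alt
  dsimp only
  rw [group_eq_double_insert scores edges]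
  have hg := build_inv scores edges PySem.Dict.empty PySem.Dict.empty
    (fun k => top3_nil.symm)
  rw [foldl_flatMap']
  refine congrFun (congrFun (congrArg List.foldl
    (funext fun ans => funext fun e => ?_)) (-1)) edges
  simp only [hg]
  exact middle_eq _ _ _ _ _ _ _
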